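-- pv_equiv track=rewrite | github.com/Lihong062/CS101 | APTs/APT-4/Family.py | grandchildren
-- ===== SOURCE A (Python) =====
-- def grandchildren(parents, children, person):
--     '''
--     parents (list of strings) - list of parent names corresponding to the
--         children list
--     children (list of strings) - list of child names corresponding to the
--         parents list
--     person (string) - a person listed in parents
--
--     Return the number of grandchildren for the person in the person variable
--     '''
--
--     grandchildren = set()
--     for i in range(len(parents)):
--         if parents[i] == person: # if p is c's parent
--             for j in range(len(parents)):
--                 if parents[j] == children[i]: # if c is g's parent
--                     grandchildren.add(children[j])
--     return len(grandchildren)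
-- ===== SOURCE B (Python) =====
-- def grandchildren(parents, children, person):
--     # Build parent -> list of children once, then two dictionary lookups.
--     kids = {}
--     for p, c in zip(parents, children):
--         kids.setdefault(p, []).append(c)
--     gs = set()
--     for c in kids.get(person, []):
--         gs.update(kids.get(c, []))
--     return len(gs)
-- ===== Notes on version B (the rewrite author's own statement) =====
-- stated objective: alternative
-- what changed: Replaced the nested index scans over parents with a single pass building a parent->children dict, then two lookups whose child lists are unioned into a set.
-- outside the precondition, e.g. on grandchildren(['a', 'b'], ['c'], 'z'): A returns 0, B returns 0
import Mathlib
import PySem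

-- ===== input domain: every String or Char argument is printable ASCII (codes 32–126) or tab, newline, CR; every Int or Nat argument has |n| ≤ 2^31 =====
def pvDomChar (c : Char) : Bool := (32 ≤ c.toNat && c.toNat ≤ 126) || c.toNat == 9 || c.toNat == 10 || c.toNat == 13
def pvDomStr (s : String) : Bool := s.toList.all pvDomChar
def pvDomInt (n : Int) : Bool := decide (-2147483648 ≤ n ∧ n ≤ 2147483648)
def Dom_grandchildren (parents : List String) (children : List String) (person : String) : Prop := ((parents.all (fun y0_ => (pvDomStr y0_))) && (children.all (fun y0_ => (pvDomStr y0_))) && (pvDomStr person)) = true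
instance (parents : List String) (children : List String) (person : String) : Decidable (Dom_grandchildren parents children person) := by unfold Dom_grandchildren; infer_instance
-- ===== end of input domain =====

-- B replaces A's nested index scans by one dict-building pass plus two lookups;
-- equivalence is proved for len(parents) ≤ len(children) (Pre_), where A cannot raise IndexError.

-- ===== PORT A =====
-- Indexing uses pyGetD with default "": inside Pre_grandchildren every access is in range, so it is exact there.
def grandchildren (parents : List String) (children : List String) (person : String) : Int :=
  let g := (PySem.List.pyRange 0 (PySem.List.len parents) 1).foldl (fun g i =>
      if PySem.List.pyGetD parents i "" == person then
        (PySem.List.pyRange 0 (PySem.List.len parents) 1).foldl (fun g j =>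
          if PySem.List.pyGetD parents j "" == PySem.List.pyGetD children i "" then
            PySem.Set.add g (PySem.List.pyGetD children j "")
          else g) g
      else g) PySem.Set.empty
  (PySem.Set.len g : Int)

-- ===== PORT B =====
-- kids.setdefault(p, []).append(c) is observationally kids[p] = kids.get(p, []) + [c], i.e. Dict.modify.
def grandchildren_alt (parents : List String) (children : List String) (person : String) : Int :=
  let kids := (parents.zip children).foldl
      (fun d pc => d.modify pc.1 [] (fun l => l ++ [pc.2])) PySem.Dict.empty
  let gs := (kids.getD person []).foldl
      (fun s c => PySem.Set.update s (kids.getD c [])) PySem.Set.empty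
  (PySem.Set.len gs : Int)

-- ===== PRECONDITION & SPEC =====
-- Pre_ excludes inputs with more parents than children: there A indexes children out of range and
-- raises IndexError whenever the loop reaches such an index (when it happens not to, A returns the
-- same count B does).
def Pre_grandchildren (parents : List String) (children : List String) (person : String) : Prop :=
  parents.length ≤ children.length
instance (parents : List String) (children : List String) (person : String) : Decidable (Pre_grandchildren parents children person) := by unfold Pre_grandchildren; infer_instance

def pvWitness_grandchildren : List String × List String × String :=
  (["ann", "bob", "ann"], ["bob", "cal", "dee"], "ann")

def Spec_grandchildren (parents : List String) (children : List String) (person : String) (out : Int) : Prop := out = grandchildren_alt parents children person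
instance (parents : List String) (children : List String) (person : String) (out : Int) : Decidable (Spec_grandchildren parents children person out) := by unfold Spec_grandchildren; infer_instance

-- ===== CLAIM (what is proved, stated in full; the proofs are below) =====
def Claim_equal_grandchildren : Prop := ∀ (parents : List String) (children : List String) (person : String), Dom_grandchildren parents children person → Pre_grandchildren parents children person → Spec_grandchildren parents children person (grandchildren parents children person)

-- ===== LEMMAS AND PROOFS =====

-- the per-parent child list B's dict yields
def childListOf (L : List (String × String)) (c : String) : List String :=
  (L.filter (fun pc => pc.1 == c)).map (fun pc => pc.2)

lemma kids_getD (parents children : List String) (c : String) :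
    ((parents.zip children).foldl
      (fun d pc => d.modify pc.1 [] (fun l => l ++ [pc.2])) PySem.Dict.empty).getD c []
      = childListOf (parents.zip children) c := by
  rw [PySem.Dict.getD_foldl_modify_append]
  simp [childListOf]

-- a fold over indices reading parents[i] and children[i] is a fold over the zip
lemma fold_range_eq_fold_zip {β : Type} (parents children : List String)
    (h : parents.length ≤ children.length)
    (F : β → String → String → β) (init : β) :
    (PySem.List.pyRange 0 (PySem.List.len parents) 1).foldl
        (fun g i => F g (PySem.List.pyGetD parents i "") (PySem.List.pyGetD children i "")) init
      = (parents.zip children).foldl (fun g pc => F g pc.1 pc.2) init := by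
  have hlen : (parents.zip children).length = parents.length := by
    simp [List.length_zip]; omega
  have hcongr :
      (PySem.List.pyRange 0 (PySem.List.len parents) 1).foldl
        (fun g i => F g (PySem.List.pyGetD parents i "") (PySem.List.pyGetD children i "")) init
      = (PySem.List.pyRange 0 (PySem.List.len (parents.zip children)) 1).foldl
        (fun g i => (fun g pc => F g pc.1 pc.2) g (PySem.List.pyGetD (parents.zip children) i ("",""))) init := by
    have hlen' : PySem.List.len (parents.zip children) = PySem.List.len parents := by
      simp [PySem.List.len, hlen]
    rw [hlen']
    apply PySem.List.foldl_congr_mem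
    intro acc i hi
    have hmem := (PySem.List.mem_pyRange_one).1 hi
    have h0 : 0 ≤ i := hmem.1
    have h1 : i < (parents.length : Int) := by
      simpa [PySem.List.len] using hmem.2
    obtain ⟨k, rfl⟩ : ∃ k : ℕ, i = (k : Int) := ⟨i.toNat, by omega⟩
    have hk : k < parents.length := by exact_mod_cast h1
    have hkc : k < children.length := lt_of_lt_of_le hk h
    have hkz : k < (parents.zip children).length := by omega
    rw [PySem.List.pyGetD_natCast, PySem.List.pyGetD_natCast, PySem.List.pyGetD_natCast]
    simp [hk, hkc, List.getD_eq_getElem?_getD, List.getElem_zip]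
  rw [hcongr]
  exact PySem.List.foldl_pyRange_zero_pyGetD (parents.zip children) ("","")
    (fun g pc => F g pc.1 pc.2) init

-- A's inner loop adds exactly the children of c, i.e. updates the set with childListOf L c
lemma inner_loop_eq (L : List (String × String)) (c : String) (g : PySem.Set String) :
    L.foldl (fun g pc => if pc.1 == c then PySem.Set.add g pc.2 else g) g
      = PySem.Set.update g (childListOf L c) := by
  rw [PySem.List.foldl_if_eq_foldl_filter]
  unfold childListOf PySem.Set.update
  rw [List.foldl_map]

-- A's outer loop, once the inner loop is a set-update, folds exactly over person's children
lemma outer_eq (L : List (String × String)) (c : String) (F : String → List String)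
    (init : PySem.Set String) :
    L.foldl (fun g pc => if pc.1 == c then PySem.Set.update g (F pc.2) else g) init
      = (childListOf L c).foldl (fun g x => PySem.Set.update g (F x)) init := by
  induction L generalizing init with
  | nil => rfl
  | cons hd tl ih =>
    by_cases h : hd.1 == c
    · simp only [childListOf, List.filter_cons, h, if_true, List.map_cons, List.foldl_cons]
      simpa [childListOf] using ih (PySem.Set.update init (F hd.2))
    · simp only [childListOf, List.filter_cons, h, Bool.false_eq_true, if_false, List.foldl_cons]
      simpa [childListOf] using ih init

-- ===== VERDICT (by name: the statement is the Claim_ definition above) =====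
theorem grandchildren_spec : Claim_equal_grandchildren := by
  intro parents children person _ hpre
  unfold Spec_grandchildren
  have hkfun :
      (fun (s : PySem.Set String) (c : String) =>
        PySem.Set.update s (((parents.zip children).foldl
          (fun d pc => d.modify pc.1 [] (fun l => l ++ [pc.2])) PySem.Dict.empty).getD c []))
      = (fun s c => PySem.Set.update s (childListOf (parents.zip children) c)) := by
    funext s c
    rw [kids_getD]
  have hB : grandchildren_alt parents children person
      = ((PySem.Set.len ((childListOf (parents.zip children) person).foldl
          (fun g c => PySem.Set.update g (childListOf (parents.zip children) c))
          PySem.Set.empty)) : Int) := by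
    simp only [grandchildren_alt]
    rw [kids_getD, hkfun]
  rw [hB]
  simp only [grandchildren]
  rw [fold_range_eq_fold_zip parents children hpre
      (fun g p c => if p == person then
        (PySem.List.pyRange 0 (PySem.List.len parents) 1).foldl (fun g j =>
          if PySem.List.pyGetD parents j "" == c then
            PySem.Set.add g (PySem.List.pyGetD children j "")
          else g) g
      else g) PySem.Set.empty]
  have hfun :
      (fun (g : PySem.Set String) (pc : String × String) =>
        if pc.1 == person then
          (PySem.List.pyRange 0 (PySem.List.len parents) 1).foldl (fun g j =>
            if PySem.List.pyGetD parents j "" == pc.2 then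
              PySem.Set.add g (PySem.List.pyGetD children j "")
            else g) g
        else g)
      = (fun g pc => if pc.1 == person then
          PySem.Set.update g (childListOf (parents.zip children) pc.2) else g) := by
    funext g pc
    by_cases hp : pc.1 == person
    · simp only [hp, if_true]
      rw [fold_range_eq_fold_zip parents children hpre
          (fun g p c => if p == pc.2 then PySem.Set.add g c else g) g]
      exact inner_loop_eq (parents.zip children) pc.2 g
    · simp [hp]
  rw [hfun]
  rw [outer_eq (parents.zip children) person (childListOf (parents.zip children)) PySem.Set.empty]
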